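-- pv_equiv track=rewrite | github.com/iamr00j/codecademy-cs | Loops/script.py | over_nine_thousand
-- ===== SOURCE A (Python) =====
-- def over_nine_thousand(lst):
--   add = 0
--   if len(lst) == 0:
--     return 0
--   for x in lst:
--       add += x
--       if add > 9000:
--         break
--   return add
-- ===== SOURCE B (Python) =====
-- def over_nine_thousand(lst):
--   if len(lst) == 0:
--     return 0
--   # pass 1: build the full prefix-sum table
--   sums = []
--   total = 0
--   for x in lst:
--     total += x
--     sums.append(total)
--   # pass 2: search it for the first value exceeding 9000
--   for s in sums:
--     if s > 9000:
--       return s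
--   return sums[-1]
-- ===== Notes on version B (the rewrite author's own statement) =====
-- stated objective: alternative
-- what changed: Replaces the fused accumulate-with-break loop by two separate passes: build the full prefix-sum table, then scan it for the first value exceeding 9000 (falling back to the last entry, the total).
import Mathlib
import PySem

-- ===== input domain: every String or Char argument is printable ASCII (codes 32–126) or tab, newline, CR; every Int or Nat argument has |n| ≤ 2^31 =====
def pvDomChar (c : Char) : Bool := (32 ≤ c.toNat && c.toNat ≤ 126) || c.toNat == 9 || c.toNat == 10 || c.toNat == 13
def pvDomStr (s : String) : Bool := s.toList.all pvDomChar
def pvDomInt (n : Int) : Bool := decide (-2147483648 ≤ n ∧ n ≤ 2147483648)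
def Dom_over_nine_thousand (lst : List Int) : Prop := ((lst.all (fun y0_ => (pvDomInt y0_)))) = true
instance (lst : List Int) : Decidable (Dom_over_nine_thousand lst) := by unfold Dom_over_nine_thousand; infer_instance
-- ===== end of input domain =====

-- B replaces A's fused accumulate-with-break loop by two passes (build prefix-sum table, then search it); alternative, same cost.

-- ===== PORT A =====
-- the 'for x in lst: add += x; if add > 9000: break' loop
def onOverLoop (add : Int) : List Int → Int
  | [] => add
  | x :: xs =>
    let a := add + x
    if a > 9000 then a else onOverLoop a xs

def over_nine_thousand (lst : List Int) : Int :=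
  if lst.length = 0 then 0 else onOverLoop 0 lst

-- ===== PORT B =====
-- pass 1: prefix-sum table (running total t)
def onPrefix (t : Int) : List Int → List Int
  | [] => []
  | x :: xs => (t + x) :: onPrefix (t + x) xs

-- pass 2: first element > 9000
def onFind : List Int → Option Int
  | [] => none
  | s :: ss => if s > 9000 then some s else onFind ss

def over_nine_thousand_alt (lst : List Int) : Int :=
  if lst.length = 0 then 0
  else
    let sums := onPrefix 0 lst
    match onFind sums with
    | some s => s
    | none => sums.getLastD 0   -- sums[-1]; sums is nonempty here

-- ===== PRECONDITION & SPEC =====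
def Spec_over_nine_thousand (lst : List Int) (out : Int) : Prop := out = over_nine_thousand_alt lst
instance (lst : List Int) (out : Int) : Decidable (Spec_over_nine_thousand lst out) := by unfold Spec_over_nine_thousand; infer_instance

-- ===== CLAIM (what is proved, stated in full; the proofs are below) =====
def Claim_equal_over_nine_thousand : Prop := ∀ (lst : List Int), Dom_over_nine_thousand lst → Spec_over_nine_thousand lst (over_nine_thousand lst)

-- ===== LEMMAS AND PROOFS =====
theorem onLoop_eq (xs : List Int) : ∀ (add : Int), xs ≠ [] →
    onOverLoop add xs =
      (match onFind (onPrefix add xs) with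
       | some s => s
       | none => (onPrefix add xs).getLastD 0) := by
  induction xs with
  | nil => intro _ h; exact absurd rfl h
  | cons x xs ih =>
    intro add _
    simp only [onOverLoop, onPrefix, onFind]
    by_cases h : add + x > 9000
    · simp [h]
    · simp only [h, if_false]
      cases xs with
      | nil => simp [onOverLoop, onPrefix, onFind]
      | cons y ys =>
        rw [ih (add + x) (by simp)]
        cases hf : onFind (onPrefix (add + x) (y :: ys)) with
        | some s => simp
        | none =>
          simp only [hf]
          simp [onPrefix, List.getLast?_cons_cons]

-- ===== VERDICT (by name: the statement is the Claim_ definition above) =====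
theorem over_nine_thousand_spec : Claim_equal_over_nine_thousand := by
  intro lst _
  unfold Spec_over_nine_thousand over_nine_thousand over_nine_thousand_alt
  cases lst with
  | nil => simp
  | cons x xs => simpa using onLoop_eq (x :: xs) 0 (by simp)
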